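-- pv_equiv track=rewrite | github.com/WRK7/Senac-Python | Listas do Maurício/Lista 01/26.py | soma_pares
-- ===== SOURCE A (Python) =====
-- def soma_pares(lista):
--     lista_duplicado = []
--     lista_duplicado2 = []
--     for elemento in lista:
--         if elemento not in lista_duplicado:
--             lista_duplicado.append(elemento)
--         else:
--             lista_duplicado2.append(elemento)
--     return sum(lista_duplicado2)
-- ===== SOURCE B (Python) =====
-- def soma_pares(lista):
--     return sum(lista) - sum(set(lista))
-- ===== Notes on version B (the rewrite author's own statement) =====
-- stated objective: faster
-- what changed: Replaces the seen/duplicate two-list loop with its quadratic membership tests by the identity total - sum(distinct): sum(lista) - sum(set(lista)).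
import Mathlib
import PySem

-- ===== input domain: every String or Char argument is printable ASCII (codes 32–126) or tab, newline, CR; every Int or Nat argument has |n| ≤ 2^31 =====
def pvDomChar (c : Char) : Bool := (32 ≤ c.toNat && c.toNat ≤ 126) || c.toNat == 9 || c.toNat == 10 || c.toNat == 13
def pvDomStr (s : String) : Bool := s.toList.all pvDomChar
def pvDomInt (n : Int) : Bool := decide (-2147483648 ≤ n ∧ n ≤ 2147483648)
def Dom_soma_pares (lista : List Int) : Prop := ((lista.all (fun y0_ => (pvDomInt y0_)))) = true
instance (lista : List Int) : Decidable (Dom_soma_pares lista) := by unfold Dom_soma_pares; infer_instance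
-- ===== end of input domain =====

-- B replaces A's seen/duplicate two-list loop with the identity sum(lista) - sum(set(lista)); return value only, no side effects.

-- ===== PORT A =====
def soma_pares (lista : List Int) : Int :=
  (lista.foldl
    (fun (st : List Int × List Int) elemento =>
      if st.1.contains elemento = false then (st.1 ++ [elemento], st.2)
      else (st.1, st.2 ++ [elemento]))
    ([], [])).2.sum

-- ===== PORT B =====
def soma_pares_alt (lista : List Int) : Int :=
  lista.sum - (PySem.Set.ofList lista).sum

-- ===== PRECONDITION & SPEC =====
def Spec_soma_pares (lista : List Int) (out : Int) : Prop := out = soma_pares_alt lista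
instance (lista : List Int) (out : Int) : Decidable (Spec_soma_pares lista out) := by unfold Spec_soma_pares; infer_instance

-- ===== CLAIM (what is proved, stated in full; the proofs are below) =====
def Claim_equal_soma_pares : Prop := ∀ (lista : List Int), Dom_soma_pares lista → Spec_soma_pares lista (soma_pares lista)

-- ===== LEMMAS AND PROOFS =====

-- Loop invariant: from state (s, d), the duplicates list sums to d.sum + l.sum + s.sum - (set s updated with l).sum
theorem soma_pares_loop_inv (l : List Int) (s d : List Int) :
    (l.foldl
      (fun (st : List Int × List Int) elemento =>
        if st.1.contains elemento = false then (st.1 ++ [elemento], st.2)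
        else (st.1, st.2 ++ [elemento]))
      (s, d)).2.sum
    = d.sum + l.sum + s.sum - (PySem.Set.update s l).sum := by
  induction l generalizing s d with
  | nil => simp [PySem.Set.update]
  | cons x xs ih =>
    by_cases h : s.contains x = true
    · have hm : x ∈ s := by simpa using h
      simp only [List.foldl_cons, PySem.Set.update]
      rw [show (if (s.contains x) = false then (s ++ [x], d) else (s, d ++ [x])) = (s, d ++ [x]) by simp [hm]]
      rw [show PySem.Set.add s x = s by simp [PySem.Set.add, hm]]
      rw [ih s (d ++ [x])]
      simp [PySem.Set.update]
      ring
    · have hm : x ∉ s := by simpa using h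
      simp only [List.foldl_cons, PySem.Set.update]
      rw [show (if (s.contains x) = false then (s ++ [x], d) else (s, d ++ [x])) = (s ++ [x], d) by simp [hm]]
      rw [show PySem.Set.add s x = s ++ [x] by simp [PySem.Set.add, hm]]
      rw [ih (s ++ [x]) d]
      simp [PySem.Set.update]
      ring

-- ===== VERDICT (by name: the statement is the Claim_ definition above) =====
theorem soma_pares_spec : Claim_equal_soma_pares := by
  intro lista _
  unfold Spec_soma_pares soma_pares soma_pares_alt
  rw [soma_pares_loop_inv lista [] []]
  rw [PySem.Set.ofList_eq_foldl]
  simp [PySem.Set.update]
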